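-- pv_equiv track=rewrite | github.com/talvola/generic_poker | tools/generate_rankings/generate_low_hand_a6_rankings.py | reverse_all_ranks_and_ordered_ranks
-- ===== SOURCE A (Python) =====
-- from collections import defaultdict
--
-- def reverse_all_ranks_and_ordered_ranks(all_hands):
--     # Separate the hands by their ranks
--     rank_groups = defaultdict(list)
--     for hand in all_hands:
--         rank = hand[1]
--         rank_groups[rank].append(hand)
--
--     # Maximum rank value
--     max_rank = max(rank_groups.keys())
--
--     # Create a new list to hold the adjusted hands
--     adjusted_hands = []
--
--     # Process each rank group
--     for rank in sorted(rank_groups.keys()):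
--         hands = rank_groups[rank]
--
--         # Reverse the rank value
--         new_rank = max_rank + 1 - rank
--
--         # Sort hands by their ordered rank
--         hands.sort(key=lambda x: x[2])
--
--         # Create a map of old ordered ranks to new ordered ranks
--         ordered_rank_map = {}
--         unique_ordered_ranks = sorted(set(hand[2] for hand in hands), reverse=True)
--         for i, old_ordered_rank in enumerate(unique_ordered_ranks, start=1):
--             ordered_rank_map[old_ordered_rank] = i
--
--         # Adjust the hands with new ranks and ordered ranks
--         for hand in hands:
--             new_ordered_rank = ordered_rank_map[hand[2]]
--             adjusted_hands.append((hand[0], new_rank, new_ordered_rank))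
--
--     # Sort the adjusted hands to maintain the overall order
--     adjusted_hands.sort(key=lambda x: (x[1], x[2]))
--
--     return adjusted_hands
-- ===== SOURCE B (Python) =====
-- def reverse_all_ranks_and_ordered_ranks(all_hands):
--     max_rank = max(h[1] for h in all_hands)
--     result = []
--     cur_rank = None
--     prev_ord = None
--     counter = 0
--     for h in sorted(all_hands, key=lambda x: (-x[1], -x[2])):
--         if cur_rank is None or h[1] != cur_rank:
--             cur_rank = h[1]
--             prev_ord = None
--             counter = 0
--         if prev_ord is None or h[2] != prev_ord:
--             counter += 1
--             prev_ord = h[2]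
--         result.append((h[0], max_rank + 1 - h[1], counter))
--     return result
-- ===== Notes on version B (the rewrite author's own statement) =====
-- stated objective: simpler
-- what changed: B replaces A's rank-group dictionary, per-group sorts, per-group ordered-rank-map dicts and final re-sort by one stable sort on the key (-rank, -ordered_rank) followed by a single linear scan that assigns the dense ordered ranks with a counter.
import Mathlib
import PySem

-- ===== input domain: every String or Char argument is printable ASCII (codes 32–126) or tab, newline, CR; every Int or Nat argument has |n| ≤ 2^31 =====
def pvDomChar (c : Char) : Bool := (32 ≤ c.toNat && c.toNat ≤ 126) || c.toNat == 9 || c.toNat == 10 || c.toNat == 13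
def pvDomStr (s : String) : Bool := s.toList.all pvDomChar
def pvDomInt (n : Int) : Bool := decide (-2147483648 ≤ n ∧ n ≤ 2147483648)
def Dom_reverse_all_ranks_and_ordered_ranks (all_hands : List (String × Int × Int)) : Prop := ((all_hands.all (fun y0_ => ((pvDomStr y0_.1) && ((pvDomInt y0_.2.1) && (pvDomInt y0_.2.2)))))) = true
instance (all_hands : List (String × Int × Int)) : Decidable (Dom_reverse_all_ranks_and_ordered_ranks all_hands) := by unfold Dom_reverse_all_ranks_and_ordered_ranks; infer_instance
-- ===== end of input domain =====

-- B replaces A's rank-group dict, per-group sorts and rank-map dicts, and final re-sort by ONE stable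
-- sort on the key (-rank, -ordered_rank) plus a single counting scan; same return value (A does not
-- mutate its argument), proved equal on every non-empty input.

-- ===== PORT A =====
def reverse_all_ranks_and_ordered_ranks (all_hands : List (String × Int × Int)) : List (String × Int × Int) :=
  -- rank_groups = defaultdict(list); for hand: rank_groups[hand[1]].append(hand)
  let rank_groups : PySem.Dict Int (List (String × Int × Int)) :=
    all_hands.foldl (fun d hand => d.modify hand.2.1 [] (· ++ [hand])) PySem.Dict.empty
  -- max_rank = max(rank_groups.keys())  (ValueError on empty → none, excluded by Pre_)
  match PySem.List.max? rank_groups.keys (fun k => k) with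
  | none => []
  | some max_rank =>
    let adjusted_hands :=
      (PySem.List.sorted rank_groups.keys (fun k => k) false).foldl (fun acc rank =>
        let hands := rank_groups.getD rank []
        let new_rank := max_rank + 1 - rank
        let hands := PySem.List.sorted hands (fun x => x.2.2) false
        let unique_ordered_ranks :=
          PySem.List.sorted (PySem.Set.ofList (hands.map (fun h => h.2.2))) (fun v => v) true
        let ordered_rank_map : PySem.Dict Int Int :=
          (PySem.List.enumerate unique_ordered_ranks 1).foldl (fun m p => m.insert p.2 p.1) PySem.Dict.empty
        hands.foldl (fun acc hand =>
          -- ordered_rank_map[hand[2]]: the key is always present (built from these hands' ordered ranks)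
          acc ++ [(hand.1, new_rank, ((ordered_rank_map.get? hand.2.2).getD 0))]) acc) []
    PySem.List.sorted2 adjusted_hands (fun x => x.2.1) (fun x => x.2.2) false

-- ===== PORT B =====
def reverse_all_ranks_and_ordered_ranks_alt (all_hands : List (String × Int × Int)) : List (String × Int × Int) :=
  -- max_rank = max(h[1] for h in all_hands)  (ValueError on empty → none, excluded by Pre_)
  match PySem.List.max? (all_hands.map (fun h => h.2.1)) (fun v => v) with
  | none => []
  | some max_rank =>
    -- one stable sort by (-rank, -ordered_rank), then a single counting scan
    ((PySem.List.sorted2 all_hands (fun x => -x.2.1) (fun x => -x.2.2) false).foldl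
      (fun (st : Option Int × Option Int × Int × List (String × Int × Int)) h =>
        let st1 := if st.1 ≠ some h.2.1 then ((some h.2.1 : Option Int), (none : Option Int), (0 : Int))
                   else (st.1, st.2.1, st.2.2.1)
        let st2 := if st1.2.1 ≠ some h.2.2 then ((some h.2.2 : Option Int), st1.2.2 + 1)
                   else (st1.2.1, st1.2.2)
        (st1.1, st2.1, st2.2, st.2.2.2 ++ [(h.1, max_rank + 1 - h.2.1, st2.2)]))
      (none, none, 0, [])).2.2.2

-- ===== PRECONDITION & SPEC =====
-- Pre_ excludes only the empty list, on which A raises ValueError (max() of an empty sequence).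
def Pre_reverse_all_ranks_and_ordered_ranks (all_hands : List (String × Int × Int)) : Prop :=
  all_hands ≠ []
instance (all_hands : List (String × Int × Int)) : Decidable (Pre_reverse_all_ranks_and_ordered_ranks all_hands) := by
  unfold Pre_reverse_all_ranks_and_ordered_ranks; infer_instance

def pvWitness_reverse_all_ranks_and_ordered_ranks : (List (String × Int × Int)) := [("AAKKQ", 1, 1), ("AAKKJ", 1, 2), ("22345", 2, 1)]

def Spec_reverse_all_ranks_and_ordered_ranks (all_hands : List (String × Int × Int)) (out : List (String × Int × Int)) : Prop := out = reverse_all_ranks_and_ordered_ranks_alt all_hands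
instance (all_hands : List (String × Int × Int)) (out : List (String × Int × Int)) : Decidable (Spec_reverse_all_ranks_and_ordered_ranks all_hands out) := by unfold Spec_reverse_all_ranks_and_ordered_ranks; infer_instance

-- ===== CLAIM (what is proved, stated in full; the proofs are below) =====
def Claim_equal_reverse_all_ranks_and_ordered_ranks : Prop := ∀ (all_hands : List (String × Int × Int)), Dom_reverse_all_ranks_and_ordered_ranks all_hands → Pre_reverse_all_ranks_and_ordered_ranks all_hands → Spec_reverse_all_ranks_and_ordered_ranks all_hands (reverse_all_ranks_and_ordered_ranks all_hands)

-- ===== LEMMAS AND PROOFS =====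

-- hand type abbreviation (proof-side only)
abbrev pvHand : Type := String × Int × Int

-- insertion sort over an abstract 'before' relation: both PySem.List.sorted and sorted2 ARE this foldl
def pvIsort {α : Type} (before : α → α → Bool) (xs : List α) : List α :=
  xs.foldl (fun acc x => PySem.List.insertBy before x acc) []

-- the concrete comparison functions appearing in the two ports
def pvLtA : pvHand → pvHand → Bool := fun a b =>
  decide (a.2.1 < b.2.1) || (!decide (b.2.1 < a.2.1) && decide (a.2.2 < b.2.2))
def pvLtB : pvHand → pvHand → Bool := fun a b =>
  decide (-a.2.1 < -b.2.1) || (!decide (-b.2.1 < -a.2.1) && decide (-a.2.2 < -b.2.2))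
def pvFwd : pvHand → pvHand → Bool := fun a b => decide (a.2.2 < b.2.2)
def pvRev : pvHand → pvHand → Bool := fun a b => decide (b.2.2 < a.2.2)
def pvKbF : Int → Int → Bool := fun a b => decide (a < b)
def pvKbT : Int → Int → Bool := fun a b => decide (b < a)

-- B's counting scan, written as a standalone recursion (the canonical per-group payload)
def pvDensify (M r : Int) : List pvHand → Option Int → Int → List pvHand
  | [], _, _ => []
  | h :: t, prev, c =>
      let c' := if prev = some h.2.2 then c else c + 1
      (h.1, M + 1 - r, c') :: pvDensify M r t (some h.2.2) c'

-- ---- basic insertBy / isort lemmas ----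
theorem pvIb_split {α : Type} (before : α → α → Bool) (x : α) (ys : List α) :
    PySem.List.insertBy before x ys =
      ys.takeWhile (fun y => !before x y) ++ x :: ys.dropWhile (fun y => !before x y) := by
  induction ys with
  | nil => simp [PySem.List.insertBy]
  | cons y t ih =>
      by_cases h : before x y
      · simp [PySem.List.insertBy, h]
      · simp only [PySem.List.insertBy] at *
        simp [h, ih]

theorem pvIb_skip {α : Type} (before : α → α → Bool) (x : α) (as bs : List α)
    (h : ∀ y ∈ as, before x y = false) :
    PySem.List.insertBy before x (as ++ bs) = as ++ PySem.List.insertBy before x bs := by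
  induction as with
  | nil => rfl
  | cons a t ih =>
      have ha : before x a = false := h a (by simp)
      simp only [List.cons_append, PySem.List.insertBy, ha]
      simp only [Bool.false_eq_true, if_false]
      exact congrArg (a :: ·) (ih (fun y hy => h y (by simp [hy])))

theorem pvIb_mid {α : Type} (before : α → α → Bool) (x b : α) (as bs : List α)
    (hb : before x b = true) :
    PySem.List.insertBy before x (as ++ b :: bs) = PySem.List.insertBy before x as ++ b :: bs := by
  induction as with
  | nil => simp [PySem.List.insertBy, hb]
  | cons a t ih =>
      by_cases ha : before x a
      · simp [PySem.List.insertBy, ha]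
      · simp only [List.cons_append, PySem.List.insertBy, ha]
        simp [ih]

theorem pvIb_blocks {α : Type} (before : α → α → Bool) (x : α) (P Bv R : List α)
    (hP : ∀ y ∈ P, before x y = false) (hR : ∀ z ∈ R, before x z = true) :
    PySem.List.insertBy before x (P ++ Bv ++ R) = P ++ PySem.List.insertBy before x Bv ++ R := by
  cases R with
  | nil =>
      simp only [List.append_nil]
      exact pvIb_skip before x P Bv hP
  | cons z R' =>
      rw [pvIb_mid before x z (P ++ Bv) R' (hR z (by simp)),
        pvIb_skip before x P Bv hP]

theorem pvIb_congr {α : Type} (before before' : α → α → Bool) (x : α) (l : List α)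
    (h : ∀ y ∈ l, before x y = before' x y) :
    PySem.List.insertBy before x l = PySem.List.insertBy before' x l := by
  induction l with
  | nil => rfl
  | cons y t ih =>
      have := h y (by simp)
      simp only [PySem.List.insertBy, ← this]
      by_cases hb : before x y <;>
        simp [hb, ih (fun z hz => h z (by simp [hz]))]

theorem pvIsort_append_singleton {α : Type} (before : α → α → Bool) (xs : List α) (x : α) :
    pvIsort before (xs ++ [x]) = PySem.List.insertBy before x (pvIsort before xs) := by
  simp [pvIsort, List.foldl_append]

theorem pvIb_perm {α : Type} (before : α → α → Bool) (x : α) (l : List α) :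
    (PySem.List.insertBy before x l).Perm (x :: l) := by
  rw [pvIb_split]
  calc (l.takeWhile (fun y => !before x y) ++ x :: l.dropWhile (fun y => !before x y)).Perm
        (x :: (l.takeWhile (fun y => !before x y) ++ l.dropWhile (fun y => !before x y))) :=
        List.perm_append_comm_assoc _ [x] _ |>.trans (by simp)
    _ = (x :: l) := by rw [List.takeWhile_append_dropWhile]

theorem pvIsort_perm {α : Type} (before : α → α → Bool) (xs : List α) :
    (pvIsort before xs).Perm xs := by
  induction xs using List.reverseRecOn with
  | nil => rfl
  | append_singleton t x ih =>
      rw [pvIsort_append_singleton]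
      refine (pvIb_perm before x _).trans ?_
      refine (ih.cons x).trans ?_
      simpa using List.perm_append_comm (l₁ := [x]) (l₂ := t)

theorem pvMem_isort {α : Type} (before : α → α → Bool) (xs : List α) (y : α) :
    y ∈ pvIsort before xs ↔ y ∈ xs := (pvIsort_perm before xs).mem_iff

theorem pvIsort_congr {α : Type} (before before' : α → α → Bool) (xs : List α)
    (h : ∀ a ∈ xs, ∀ b ∈ xs, before a b = before' a b) :
    pvIsort before xs = pvIsort before' xs := by
  induction xs using List.reverseRecOn with
  | nil => rfl
  | append_singleton t x ih =>
      rw [pvIsort_append_singleton, pvIsort_append_singleton,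
        ih (fun a ha b hb => h a (by simp [ha]) b (by simp [hb]))]
      exact pvIb_congr _ _ _ _ (fun y hy =>
        h x (by simp) y (by simp [(pvMem_isort before' t y).1 hy]))

theorem pvGroupsort {α : Type} (k : α → Int) (kb : Int → Int → Bool) (before : α → α → Bool)
    (hkb_total : ∀ a b : Int, a ≠ b → kb a b = true ∨ kb b a = true)
    (hkb_asymm : ∀ a b : Int, kb a b = true → kb b a = false)
    (hkb_trans : ∀ a b c : Int, kb a b = true → kb b c = true → kb a c = true)
    (hpw : ∀ S : List Int, S.Nodup → (pvIsort kb S).Pairwise (fun a b => kb a b = true))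
    (h1 : ∀ x y, kb (k x) (k y) = true → before x y = true)
    (h2 : ∀ x y, kb (k y) (k x) = true → before x y = false)
    (xs : List α) :
    pvIsort before xs = (pvIsort kb (PySem.Set.ofList (xs.map k))).flatMap
      (fun v => pvIsort before (xs.filter (fun h => k h == v))) := by
  have hirr : ∀ a : Int, kb a a = false := by
    intro a
    by_cases h : kb a a = true
    · have := hkb_asymm a a h; simp [h] at this
    · simpa using h
  induction xs using List.reverseRecOn with
  | nil => rfl
  | append_singleton t x ih =>
      have hSnd : (PySem.Set.ofList (t.map k)).Nodup := PySem.Set.nodup_ofList _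
      have hvsPerm : (pvIsort kb (PySem.Set.ofList (t.map k))).Perm (PySem.Set.ofList (t.map k)) :=
        pvIsort_perm kb _
      have hvsNd : (pvIsort kb (PySem.Set.ofList (t.map k))).Nodup := hvsPerm.nodup_iff.2 hSnd
      have hvsPw : (pvIsort kb (PySem.Set.ofList (t.map k))).Pairwise (fun a b => kb a b = true) :=
        hpw _ hSnd
      have hSnew : PySem.Set.ofList ((t ++ [x]).map k) =
          PySem.Set.add (PySem.Set.ofList (t.map k)) (k x) := by
        simp [PySem.Set.ofList, List.foldl_append]
      have hfilter : ∀ v, (t ++ [x]).filter (fun h => k h == v) =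
          t.filter (fun h => k h == v) ++ (if k x = v then [x] else []) := by
        intro v
        rw [List.filter_append]
        congr 1
        by_cases h : k x = v <;> simp [h]
      have hLHS : pvIsort before (t ++ [x]) =
          PySem.List.insertBy before x ((pvIsort kb (PySem.Set.ofList (t.map k))).flatMap
            (fun v => pvIsort before (t.filter (fun h => k h == v)))) := by
        rw [pvIsort_append_singleton, ih]
      have hblk : ∀ (L : List Int), (∀ u ∈ L, u ≠ k x) →
          (L.flatMap (fun v => pvIsort before ((t ++ [x]).filter (fun h => k h == v)))) =
          (L.flatMap (fun v => pvIsort before (t.filter (fun h => k h == v)))) := by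
        intro L hL
        induction L with
        | nil => rfl
        | cons a L' ihL =>
            simp only [List.flatMap_cons]
            rw [hfilter a, if_neg (fun he => hL a (by simp) he.symm),
              List.append_nil, ihL (fun u hu => hL u (by simp [hu]))]
      have hmemblk : ∀ v y, y ∈ pvIsort before (t.filter (fun h => k h == v)) → k y = v := by
        intro v y hy
        have := (pvMem_isort _ _ _).1 hy
        have := List.of_mem_filter this
        simpa using this
      by_cases hc : k x ∈ PySem.Set.ofList (t.map k)
      · -- key already present: key list unchanged, x joins its block
        have hadd : PySem.Set.add (PySem.Set.ofList (t.map k)) (k x) = PySem.Set.ofList (t.map k) := by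
          simp only [PySem.Set.add]
          rw [if_pos]
          exact List.contains_iff_mem.2 hc
        obtain ⟨vs₁, vs₂, hsplit⟩ := List.append_of_mem ((pvMem_isort kb _ (k x)).2 hc)
        have hpw' := hsplit ▸ hvsPw
        rw [List.pairwise_append] at hpw'
        have h1w : ∀ u ∈ vs₁, kb u (k x) = true := fun u hu => hpw'.2.2 u hu (k x) (by simp)
        have h2w : ∀ u ∈ vs₂, kb (k x) u = true := fun u hu => (List.pairwise_cons.1 hpw'.2.1).1 u hu
        have hne1 : ∀ u ∈ vs₁, u ≠ k x := by
          intro u hu he; have := h1w u hu; rw [he] at this; simp [hirr (k x)] at this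
        have hne2 : ∀ u ∈ vs₂, u ≠ k x := by
          intro u hu he; have := h2w u hu; rw [he] at this; simp [hirr (k x)] at this
        rw [hLHS, hSnew, hadd, hsplit]
        simp only [List.flatMap_append, List.flatMap_cons]
        rw [hblk vs₁ hne1, hblk vs₂ hne2, hfilter (k x), if_pos rfl,
          pvIsort_append_singleton]
        rw [← List.append_assoc, ← List.append_assoc]
        rw [pvIb_blocks before x _ _ _
          (fun y hy => by
            obtain ⟨v, hv, hyv⟩ := List.mem_flatMap.1 hy
            exact h2 x y (by rw [hmemblk v y hyv]; exact h1w v hv))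
          (fun z hz => by
            obtain ⟨v, hv, hzv⟩ := List.mem_flatMap.1 hz
            exact h1 x z (by rw [hmemblk v z hzv]; exact h2w v hv))]
      · -- fresh key: it is inserted into the key list, x forms a singleton block
        have hadd : PySem.Set.add (PySem.Set.ofList (t.map k)) (k x) =
            PySem.Set.ofList (t.map k) ++ [k x] := by
          simp only [PySem.Set.add]
          rw [if_neg]
          intro hcon
          exact hc (List.contains_iff_mem.1 hcon)
        have hxfilter : t.filter (fun h => k h == (k x)) = [] := by
          rw [List.filter_eq_nil_iff]
          intro a ha hcon
          exact hc ((PySem.Set.mem_ofList ..).2 (by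
            simp only [List.mem_map]
            exact ⟨a, ha, by simpa using (beq_iff_eq.1 hcon)⟩))
        have hvs' : pvIsort kb (PySem.Set.ofList (t.map k) ++ [k x]) =
            PySem.List.insertBy kb (k x) (pvIsort kb (PySem.Set.ofList (t.map k))) :=
          pvIsort_append_singleton kb _ (k x)
        have hsplit := pvIb_split kb (k x) (pvIsort kb (PySem.Set.ofList (t.map k)))
        have htdw := List.takeWhile_append_dropWhile
          (p := fun u => !kb (k x) u) (l := pvIsort kb (PySem.Set.ofList (t.map k)))
        have h1w : ∀ u ∈ (pvIsort kb (PySem.Set.ofList (t.map k))).takeWhile (fun u => !kb (k x) u),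
            kb u (k x) = true := by
          intro u hu
          have hne : u ≠ k x := by
            intro he
            exact hc (by
              have : u ∈ pvIsort kb (PySem.Set.ofList (t.map k)) := (List.takeWhile_sublist _).subset hu
              rw [← he]; exact (pvMem_isort kb _ u).1 this)
          have hnw : kb (k x) u = false := by
            have := List.mem_takeWhile_imp hu
            simpa using this
          rcases hkb_total u (k x) hne with h | h
          · exact h
          · rw [h] at hnw; cases hnw
        have h2w : ∀ u ∈ (pvIsort kb (PySem.Set.ofList (t.map k))).dropWhile (fun u => !kb (k x) u),
            kb (k x) u = true := by
          have hpwd : ((pvIsort kb (PySem.Set.ofList (t.map k))).dropWhile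
              (fun u => !kb (k x) u)).Pairwise (fun a b => kb a b = true) :=
            hvsPw.sublist (List.dropWhile_sublist _)
          intro u hu
          cases hdw : (pvIsort kb (PySem.Set.ofList (t.map k))).dropWhile (fun u => !kb (k x) u) with
          | nil => rw [hdw] at hu; cases hu
          | cons z r =>
              have hz : kb (k x) z = true := by
                have := List.head?_dropWhile_not (p := fun u => !kb (k x) u)
                  (l := pvIsort kb (PySem.Set.ofList (t.map k)))
                rw [hdw] at this
                simpa using this
              rw [hdw] at hu
              rcases List.mem_cons.1 hu with rfl | hu'
              · exact hz
              · have hzu : kb z u = true := by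
                  rw [hdw] at hpwd
                  exact (List.pairwise_cons.1 hpwd).1 u hu'
                exact hkb_trans _ _ _ hz hzu
        have hne1 : ∀ u ∈ (pvIsort kb (PySem.Set.ofList (t.map k))).takeWhile (fun u => !kb (k x) u),
              u ≠ k x := by
            intro u hu he; have := h1w u hu; rw [he] at this; simp [hirr (k x)] at this
        have hne2 : ∀ u ∈ (pvIsort kb (PySem.Set.ofList (t.map k))).dropWhile (fun u => !kb (k x) u),
              u ≠ k x := by
            intro u hu he; have := h2w u hu; rw [he] at this; simp [hirr (k x)] at this
        rw [hLHS, hSnew, hadd, hvs', hsplit]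
        simp only [List.flatMap_append, List.flatMap_cons]
        rw [hblk _ hne1, hblk _ hne2, hfilter (k x), if_pos rfl, hxfilter]
        conv_lhs => rw [← htdw]
        simp only [List.flatMap_append]
        have hins := pvIb_blocks before x
          (List.flatMap (fun v => pvIsort before (List.filter (fun h => k h == v) t))
            (List.takeWhile (fun u => !kb (k x) u) (pvIsort kb (PySem.Set.ofList (List.map k t))))) []
          (List.flatMap (fun v => pvIsort before (List.filter (fun h => k h == v) t))
            (List.dropWhile (fun u => !kb (k x) u) (pvIsort kb (PySem.Set.ofList (List.map k t)))))
          (fun y hy => by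
            obtain ⟨v, hv, hyv⟩ := List.mem_flatMap.1 hy
            exact h2 x y (by rw [hmemblk v y hyv]; exact h1w v hv))
          (fun z hz => by
            obtain ⟨v, hv, hzv⟩ := List.mem_flatMap.1 hz
            exact h1 x z (by rw [hmemblk v z hzv]; exact h2w v hv))
        simp only [List.append_nil] at hins
        rw [hins]
        simp [pvIsort, PySem.List.insertBy]

-- ---- instantiations of the grouping machinery ----
theorem pvKbF_pw : ∀ S : List Int, S.Nodup → (pvIsort pvKbF S).Pairwise (fun a b => pvKbF a b = true) := by
  intro S hnd
  have h1 : (pvIsort pvKbF S).Pairwise (fun a b : Int => a ≤ b) :=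
    PySem.List.sorted_pairwise S (fun v => v)
  have h2 : (pvIsort pvKbF S).Pairwise (fun a b : Int => a ≠ b) :=
    ((pvIsort_perm pvKbF S).nodup_iff.2 hnd)
  exact (h1.and h2).imp (by intro a b hab; simp [pvKbF]; omega)

theorem pvKbT_pw : ∀ S : List Int, S.Nodup → (pvIsort pvKbT S).Pairwise (fun a b => pvKbT a b = true) := by
  intro S hnd
  have h1 : (pvIsort pvKbT S).Pairwise (fun a b : Int => b ≤ a) :=
    PySem.List.sorted_pairwise_rev S (fun v => v)
  have h2 : (pvIsort pvKbT S).Pairwise (fun a b : Int => a ≠ b) :=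
    ((pvIsort_perm pvKbT S).nodup_iff.2 hnd)
  exact (h1.and h2).imp (by intro a b hab; simp [pvKbT]; omega)

theorem pvKbF_total : ∀ a b : Int, a ≠ b → pvKbF a b = true ∨ pvKbF b a = true := by
  intro a b h; simp [pvKbF]; omega
theorem pvKbF_asymm : ∀ a b : Int, pvKbF a b = true → pvKbF b a = false := by
  intro a b h; simp [pvKbF] at *; omega
theorem pvKbF_trans : ∀ a b c : Int, pvKbF a b = true → pvKbF b c = true → pvKbF a c = true := by
  intro a b c h1 h2; simp [pvKbF] at *; omega
theorem pvKbT_total : ∀ a b : Int, a ≠ b → pvKbT a b = true ∨ pvKbT b a = true := by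
  intro a b h; simp [pvKbT]; omega
theorem pvKbT_asymm : ∀ a b : Int, pvKbT a b = true → pvKbT b a = false := by
  intro a b h; simp [pvKbT] at *; omega
theorem pvKbT_trans : ∀ a b c : Int, pvKbT a b = true → pvKbT b c = true → pvKbT a c = true := by
  intro a b c h1 h2; simp [pvKbT] at *; omega

-- the canonical form both ports are reduced to (M = max rank)
def pvCanon (xs : List pvHand) (M : Int) : List pvHand :=
  (pvIsort pvKbT (PySem.Set.ofList (xs.map (fun h => h.2.1)))).flatMap
    (fun r => pvDensify M r (pvIsort pvRev (xs.filter (fun h => h.2.1 == r))) none 0)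

theorem pvFilter_rank_mem {xs : List pvHand} {r : Int} {y : pvHand}
    (hy : y ∈ xs.filter (fun h => h.2.1 == r)) : y.2.1 = r := by
  have := List.of_mem_filter hy; simpa using this

-- B's sort groups by rank descending; within a group it is the descending ordered-rank sort
theorem pvB_group (xs : List pvHand) :
    pvIsort pvLtB xs = (pvIsort pvKbT (PySem.Set.ofList (xs.map (fun h => h.2.1)))).flatMap
      (fun r => pvIsort pvRev (xs.filter (fun h => h.2.1 == r))) := by
  rw [pvGroupsort (fun h : pvHand => h.2.1) pvKbT pvLtB pvKbT_total pvKbT_asymm pvKbT_trans pvKbT_pw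
    (by intro x y h; simp [pvKbT] at h; simp [pvLtB]; omega)
    (by intro x y h; simp [pvKbT] at h; simp [pvLtB]; omega) xs]
  apply List.flatMap_congr
  intro r _
  apply pvIsort_congr
  intro a ha b hb
  have har := pvFilter_rank_mem ha
  have hbr := pvFilter_rank_mem hb
  simp [pvLtB, pvRev, har, hbr]

-- ---- the scan in port B ----
def pvStep (M : Int) : (Option Int × Option Int × Int × List pvHand) → pvHand →
    (Option Int × Option Int × Int × List pvHand) := fun st h =>
  let st1 := if st.1 ≠ some h.2.1 then ((some h.2.1 : Option Int), (none : Option Int), (0 : Int))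
             else (st.1, st.2.1, st.2.2.1)
  let st2 := if st1.2.1 ≠ some h.2.2 then ((some h.2.2 : Option Int), st1.2.2 + 1)
             else (st1.2.1, st1.2.2)
  (st1.1, st2.1, st2.2, st.2.2.2 ++ [(h.1, M + 1 - h.2.1, st2.2)])

theorem pvStep_eq_same (M r p c : Int) (res : List pvHand) (h : pvHand)
    (hr : h.2.1 = r) (hp : p = h.2.2) :
    pvStep M (some r, some p, c, res) h = (some r, some h.2.2, c, res ++ [(h.1, M + 1 - r, c)]) := by
  subst hr; subst hp; simp [pvStep]

theorem pvStep_eq_diff (M r p c : Int) (res : List pvHand) (h : pvHand)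
    (hr : h.2.1 = r) (hp : ¬ p = h.2.2) :
    pvStep M (some r, some p, c, res) h = (some r, some h.2.2, c + 1, res ++ [(h.1, M + 1 - r, c + 1)]) := by
  subst hr; simp [pvStep, hp]

theorem pvStep_eq_new (M r c : Int) (cur prev : Option Int) (res : List pvHand) (h : pvHand)
    (hr : h.2.1 = r) (hcur : cur ≠ some r) :
    pvStep M (cur, prev, c, res) h = (some r, some h.2.2, 1, res ++ [(h.1, M + 1 - r, 1)]) := by
  subst hr; simp [pvStep, hcur]

theorem pvScan_run (M r : Int) : ∀ (t : List pvHand), (∀ h ∈ t, h.2.1 = r) →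
    ∀ p c res, ∃ p' c',
      t.foldl (pvStep M) (some r, some p, c, res) = (some r, p', c', res ++ pvDensify M r t (some p) c) := by
  intro t
  induction t with
  | nil => intro _ p c res; exact ⟨some p, c, by simp [pvDensify]⟩
  | cons h t ih =>
      intro hall p c res
      have hr : h.2.1 = r := hall h (by simp)
      by_cases hp : p = h.2.2
      · obtain ⟨p', c', hrec⟩ := ih (fun y hy => hall y (by simp [hy])) h.2.2 c
          (res ++ [(h.1, M + 1 - r, c)])
        refine ⟨p', c', ?_⟩
        rw [List.foldl_cons, pvStep_eq_same M r p c res h hr hp, hrec]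
        simp [pvDensify, hp]
      · obtain ⟨p', c', hrec⟩ := ih (fun y hy => hall y (by simp [hy])) h.2.2 (c + 1)
          (res ++ [(h.1, M + 1 - r, c + 1)])
        refine ⟨p', c', ?_⟩
        rw [List.foldl_cons, pvStep_eq_diff M r p c res h hr hp, hrec]
        simp [pvDensify, hp]

theorem pvScan_block (M r : Int) (b : List pvHand) (hne : b ≠ []) (hall : ∀ h ∈ b, h.2.1 = r)
    (cur prev : Option Int) (c : Int) (res : List pvHand) (hcur : cur ≠ some r) :
    ∃ p' c', b.foldl (pvStep M) (cur, prev, c, res) = (some r, p', c', res ++ pvDensify M r b none 0) := by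
  cases b with
  | nil => exact absurd rfl hne
  | cons h t =>
      have hr : h.2.1 = r := hall h (by simp)
      obtain ⟨p', c', hrec⟩ := pvScan_run M r t (fun y hy => hall y (by simp [hy])) h.2.2 1
        (res ++ [(h.1, M + 1 - r, 1)])
      refine ⟨p', c', ?_⟩
      rw [List.foldl_cons, pvStep_eq_new M r c cur prev res h hr hcur, hrec]
      simp [pvDensify]

theorem pvScan_all (M : Int) : ∀ (vs : List Int) (B : Int → List pvHand), vs.Nodup →
    (∀ r ∈ vs, B r ≠ [] ∧ ∀ h ∈ B r, h.2.1 = r) →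
    ∀ (cur prev : Option Int) (c : Int) (res : List pvHand), (∀ r ∈ vs, cur ≠ some r) →
    ((vs.flatMap B).foldl (pvStep M) (cur, prev, c, res)).2.2.2 =
      res ++ vs.flatMap (fun r => pvDensify M r (B r) none 0) := by
  intro vs
  induction vs with
  | nil => intro B _ _ cur prev c res _; simp
  | cons r vs' ih =>
      intro B hnd hB cur prev c res hcur
      rw [List.flatMap_cons, List.foldl_append]
      obtain ⟨p', c', hrec⟩ := pvScan_block M r (B r) (hB r (by simp)).1 (hB r (by simp)).2
        cur prev c res (hcur r (by simp))
      rw [hrec, ih B (List.nodup_cons.1 hnd).2 (fun u hu => hB u (by simp [hu]))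
        (some r) p' c' _ (fun u hu => by
          simp only [ne_eq, Option.some.injEq]
          intro he
          exact (List.nodup_cons.1 hnd).1 (he ▸ hu))]
      simp

-- port B computes the canonical form
theorem pvPortB_eq (xs : List (String × Int × Int)) (M : Int)
    (hmax : PySem.List.max? (xs.map (fun h => h.2.1)) (fun v => v) = some M) :
    reverse_all_ranks_and_ordered_ranks_alt xs = pvCanon xs M := by
  unfold reverse_all_ranks_and_ordered_ranks_alt
  rw [hmax]
  show ((pvIsort pvLtB xs).foldl (pvStep M) (none, none, 0, [])).2.2.2 = pvCanon xs M
  rw [pvB_group]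
  have hnd : (pvIsort pvKbT (PySem.Set.ofList (xs.map (fun h => h.2.1)))).Nodup :=
    (pvIsort_perm _ _).nodup_iff.2 (PySem.Set.nodup_ofList _)
  rw [pvScan_all M _ _ hnd
    (fun r hr => by
      constructor
      · have hrS : r ∈ PySem.Set.ofList (xs.map (fun h => h.2.1)) := (pvMem_isort _ _ _).1 hr
        have : r ∈ xs.map (fun h => h.2.1) := (PySem.Set.mem_ofList ..).1 hrS
        obtain ⟨h, hh, hhr⟩ := List.mem_map.1 this
        have hmem : h ∈ xs.filter (fun y => y.2.1 == r) :=
          List.mem_filter.2 ⟨hh, by simp [hhr]⟩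
        exact List.ne_nil_of_mem ((pvMem_isort pvRev _ h).2 hmem)
      · intro h hh
        exact pvFilter_rank_mem ((pvMem_isort pvRev _ h).1 hh))
    none none 0 [] (fun r _ => by simp)]
  simp [pvCanon]

-- ---- port A: dictionary plumbing ----
theorem pvGroups_getD (xs : List pvHand) (r : Int) :
    (xs.foldl (fun d hand => d.modify hand.2.1 [] (· ++ [hand])) PySem.Dict.empty).getD r [] =
      xs.filter (fun h => h.2.1 == r) := by
  have h1 : xs.foldl (fun d hand => d.modify hand.2.1 [] (· ++ [hand])) PySem.Dict.empty =
      (xs.map (fun h => (h.2.1, h))).foldl (fun d p => d.modify p.1 [] (· ++ [p.2])) PySem.Dict.empty := by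
    rw [List.foldl_map]
  rw [h1, PySem.Dict.getD_foldl_modify_append]
  rw [List.filter_map, List.map_map]
  simp [Function.comp_def]

theorem pvGroups_keys (xs : List pvHand) :
    (xs.foldl (fun d hand => d.modify hand.2.1 [] (· ++ [hand])) PySem.Dict.empty).keys =
      PySem.Set.ofList (xs.map (fun h => h.2.1)) := by
  rw [PySem.Dict.keys_foldl_modify_key]
  rfl

theorem pvMax_eq (l₁ l₂ : List Int) (h : ∀ v, v ∈ l₁ ↔ v ∈ l₂) :
    PySem.List.max? l₁ (fun v => v) = PySem.List.max? l₂ (fun v => v) := by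
  cases h1 : PySem.List.max? l₁ (fun v => v) with
  | none =>
      have := (PySem.List.max?_eq_none_iff ..).1 h1
      subst this
      symm
      rw [PySem.List.max?_eq_none_iff]
      cases h2 : l₂ with
      | nil => rfl
      | cons a t => exact absurd ((h a).2 (by simp [h2])) (by simp)
  | some m =>
      cases h2 : PySem.List.max? l₂ (fun v => v) with
      | none =>
          have := (PySem.List.max?_eq_none_iff ..).1 h2
          subst this
          exact absurd ((h m).1 (PySem.List.max?_mem h1)) (by simp)
      | some m' =>
          congr 1
          have hm : m ∈ l₂ := (h m).1 (PySem.List.max?_mem h1)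
          have hm' : m' ∈ l₁ := (h m').2 (PySem.List.max?_mem h2)
          have := PySem.List.max?_isMax h1 m' hm'
          have := PySem.List.max?_isMax h2 m hm
          omega

-- ---- port A: proof-side names for the per-rank data ----
def pvGrp (xs : List pvHand) (r : Int) : List pvHand := xs.filter (fun h => h.2.1 == r)

def pvUniq (xs : List pvHand) (r : Int) : List Int :=
  pvIsort pvKbT (PySem.Set.ofList ((pvIsort pvFwd (pvGrp xs r)).map (fun h => h.2.2)))

def pvOrm (xs : List pvHand) (r : Int) : PySem.Dict Int Int :=
  (PySem.List.enumerate (pvUniq xs r) 1).foldl (fun m p => m.insert p.2 p.1) PySem.Dict.empty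

def pvPayload (xs : List pvHand) (M r : Int) : List pvHand :=
  (pvIsort pvFwd (pvGrp xs r)).map (fun h =>
    (h.1, M + 1 - r, (((pvOrm xs r).get? h.2.2).getD 0)))


-- ---- ordered-rank map: lookup = 1 + index in the descending unique list ----
theorem pvEnumFold_get (v : Int) : ∀ (us : List Int), us.Nodup → ∀ (s : Int) (d : PySem.Dict Int Int),
    ((PySem.List.enumerate us s).foldl (fun m p => m.insert p.2 p.1) d).get? v =
      if v ∈ us then some (s + (us.idxOf v : Int)) else d.get? v := by
  intro us
  induction us with
  | nil => intro _ s d; simp [PySem.List.enumerate]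
  | cons u t ih =>
      intro hnd s d
      rw [PySem.List.enumerate_cons, List.foldl_cons]
      rw [ih (List.nodup_cons.1 hnd).2 (s + 1) (d.insert u s)]
      by_cases hv : v ∈ t
      · rw [if_pos hv, if_pos (by simp [hv])]
        have hvu : v ≠ u := fun he => (List.nodup_cons.1 hnd).1 (he ▸ hv)
        rw [List.idxOf_cons_ne _ (by exact fun he => hvu he.symm)]
        congr 1
        push_cast
        ring
      · rw [if_neg hv]
        by_cases hvu : v = u
        · subst hvu
          rw [if_pos (by simp), PySem.Dict.get?_insert_self, List.idxOf_cons_self]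
          simp
        · rw [if_neg (by simp [hvu, hv]), PySem.Dict.get?_insert_of_ne]
          exact fun he => hvu (by simpa using he)

-- index in a strictly descending list is strictly antitone in the value
theorem pvIdx_anti (us : List Int) (hpw : us.Pairwise (fun a b => b < a)) (u w : Int)
    (hu : u ∈ us) (hw : w ∈ us) : (us.idxOf u < us.idxOf w ↔ w < u) := by
  have hul : us.idxOf u < us.length := List.idxOf_lt_length_of_mem hu
  have hwl : us.idxOf w < us.length := List.idxOf_lt_length_of_mem hw
  have hgu : us[us.idxOf u] = u := List.getElem_idxOf hul
  have hgw : us[us.idxOf w] = w := List.getElem_idxOf hwl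
  rw [List.pairwise_iff_getElem] at hpw
  constructor
  · intro hlt
    have := hpw (us.idxOf u) (us.idxOf w) hul hwl hlt
    rw [hgu, hgw] at this
    exact this
  · intro hlt
    rcases Nat.lt_trichotomy (us.idxOf u) (us.idxOf w) with h | h | h
    · exact h
    · have : u = w := by
        rw [← hgu, ← hgw]
        simp only [h]
      omega
    · have := hpw (us.idxOf w) (us.idxOf u) hwl hul h
      rw [hgu, hgw] at this
      omega

-- sorted-set lists with the same members are equal
theorem pvSortSet_eq (l₁ l₂ : List Int) (h : ∀ v, v ∈ l₁ ↔ v ∈ l₂) :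
    pvIsort pvKbT (PySem.Set.ofList l₁) = pvIsort pvKbT (PySem.Set.ofList l₂) := by
  apply List.Perm.eq_of_pairwise (le := fun a b : Int => b < a)
    (fun a b _ _ h1 h2 => by omega)
  · exact (pvKbT_pw _ (PySem.Set.nodup_ofList _)).imp (by intro a b hab; simpa [pvKbT] using hab)
  · exact (pvKbT_pw _ (PySem.Set.nodup_ofList _)).imp (by intro a b hab; simpa [pvKbT] using hab)
  · have hnd1 : (pvIsort pvKbT (PySem.Set.ofList l₁)).Nodup :=
      (pvIsort_perm _ _).nodup_iff.2 (PySem.Set.nodup_ofList _)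
    have hnd2 : (pvIsort pvKbT (PySem.Set.ofList l₂)).Nodup :=
      (pvIsort_perm _ _).nodup_iff.2 (PySem.Set.nodup_ofList _)
    rw [List.perm_ext_iff_of_nodup hnd1 hnd2]
    intro v
    rw [pvMem_isort, pvMem_isort, PySem.Set.mem_ofList, PySem.Set.mem_ofList, h]

-- isort commutes with map
theorem pvIb_map {α β : Type} (before : β → β → Bool) (f : α → β) (x : α) :
    ∀ l : List α, PySem.List.insertBy before (f x) (l.map f) =
      (PySem.List.insertBy (fun a b => before (f a) (f b)) x l).map f := by
  intro l
  induction l with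
  | nil => rfl
  | cons y t ih =>
      by_cases h : before (f x) (f y)
      · simp [PySem.List.insertBy, h]
      · simp only [List.map_cons, PySem.List.insertBy, h]
        simp [ih]

theorem pvIsort_map {α β : Type} (before : β → β → Bool) (f : α → β) (l : List α) :
    pvIsort before (l.map f) = (pvIsort (fun a b => before (f a) (f b)) l).map f := by
  induction l using List.reverseRecOn with
  | nil => rfl
  | append_singleton t x ih =>
      rw [List.map_append, List.map_singleton, pvIsort_append_singleton,
        pvIsort_append_singleton, ih, pvIb_map]

-- stability: an ascending sort by ordered rank does not reorder a single ordered-rank class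
theorem pvFilter_stab (v : Int) : ∀ g : List pvHand,
    (pvIsort pvFwd g).filter (fun h => h.2.2 == v) = g.filter (fun h => h.2.2 == v) := by
  intro g
  induction g using List.reverseRecOn with
  | nil => rfl
  | append_singleton t x ih =>
      have hpwL : (pvIsort pvFwd t).Pairwise (fun a b => a.2.2 ≤ b.2.2) :=
        PySem.List.sorted_pairwise t (fun h => h.2.2)
      have hsp : (pvIsort pvFwd t).filter (fun h => h.2.2 == v) =
          ((pvIsort pvFwd t).takeWhile (fun y => !pvFwd x y)).filter (fun h => h.2.2 == v)
          ++ ((pvIsort pvFwd t).dropWhile (fun y => !pvFwd x y)).filter (fun h => h.2.2 == v) := by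
        conv_lhs => rw [← List.takeWhile_append_dropWhile (p := fun y => !pvFwd x y)
          (l := pvIsort pvFwd t)]
        rw [List.filter_append]
      rw [pvIsort_append_singleton, pvIb_split, List.filter_append, List.filter_cons,
        List.filter_append]
      by_cases hx : x.2.2 = v
      · have hdnil : ((pvIsort pvFwd t).dropWhile (fun y => !pvFwd x y)).filter
            (fun h => h.2.2 == v) = [] := by
          rw [List.filter_eq_nil_iff]
          intro a ha hcon
          have hav : a.2.2 = v := by simpa using hcon
          have hpwD : ((pvIsort pvFwd t).dropWhile (fun y => !pvFwd x y)).Pairwise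
              (fun a b => a.2.2 ≤ b.2.2) := hpwL.sublist (List.dropWhile_sublist _)
          cases hd : (pvIsort pvFwd t).dropWhile (fun y => !pvFwd x y) with
          | nil => rw [hd] at ha; cases ha
          | cons z rest =>
              have hz : pvFwd x z = true := by
                have := List.head?_dropWhile_not (p := fun y => !pvFwd x y) (l := pvIsort pvFwd t)
                rw [hd] at this
                simpa using this
              have hxz : x.2.2 < z.2.2 := by simpa [pvFwd] using hz
              rw [hd] at ha
              rcases List.mem_cons.1 ha with rfl | ha'
              · omega
              · have : z.2.2 ≤ a.2.2 := (List.pairwise_cons.1 (hd ▸ hpwD)).1 a ha'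
                omega
        have h1 : ((pvIsort pvFwd t).takeWhile (fun y => !pvFwd x y)).filter
            (fun h => h.2.2 == v) = t.filter (fun h => h.2.2 == v) := by
          rw [hdnil, List.append_nil] at hsp
          rw [← hsp, ih]
        rw [if_pos (by simp [hx]), h1, hdnil]
        simp [hx]
      · rw [if_neg (by simp [hx]), ← List.filter_append, List.takeWhile_append_dropWhile, ih]
        simp [hx]



-- reverse-sorting an ascending-sorted list equals reverse-sorting the original
theorem pvOd_group (l : List pvHand) :
    pvIsort pvRev l = (pvIsort pvKbT (PySem.Set.ofList (l.map (fun h => h.2.2)))).flatMap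
      (fun v => pvIsort pvRev (l.filter (fun h => h.2.2 == v))) :=
  pvGroupsort (fun h : pvHand => h.2.2) pvKbT pvRev pvKbT_total pvKbT_asymm pvKbT_trans pvKbT_pw
    (by intro x y h; simp [pvKbT] at h; simp [pvRev]; omega)
    (by intro x y h; simp [pvKbT] at h; simp [pvRev]; omega) l

theorem pvRevFwd (g : List pvHand) :
    pvIsort pvRev (pvIsort pvFwd g) = pvIsort pvRev g := by
  rw [pvOd_group (pvIsort pvFwd g), pvOd_group g]
  rw [pvSortSet_eq ((pvIsort pvFwd g).map (fun h => h.2.2)) (g.map (fun h => h.2.2))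
    (fun v => by
      constructor
      · intro hv
        obtain ⟨h, hh, he⟩ := List.mem_map.1 hv
        exact List.mem_map.2 ⟨h, (pvMem_isort _ _ _).1 hh, he⟩
      · intro hv
        obtain ⟨h, hh, he⟩ := List.mem_map.1 hv
        exact List.mem_map.2 ⟨h, (pvMem_isort _ _ _).2 hh, he⟩)]
  exact List.flatMap_congr (fun v _ => by rw [pvFilter_stab])

-- ---- dedup of a descending list ----
theorem pvAdd_cons (v : Int) : ∀ (l : List Int) (st : List Int), v ∉ l →
    List.foldl PySem.Set.add (v :: st) l = v :: List.foldl PySem.Set.add st l := by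
  intro l
  induction l with
  | nil => intro st _; rfl
  | cons u t ih =>
      intro st hv
      rw [List.foldl_cons, List.foldl_cons]
      have huv : u ≠ v := fun he => hv (by simp [he])
      have : PySem.Set.add (v :: st) u = v :: PySem.Set.add st u := by
        by_cases hc : u ∈ st
        · simp [PySem.Set.add, PySem.Set.contains, hc]
        · simp [PySem.Set.add, PySem.Set.contains, hc, huv]
      rw [this, ih _ (fun hm => hv (by simp [hm]))]

theorem pvAdd_const (v : Int) : ∀ (l : List Int), (∀ u ∈ l, u = v) →
    List.foldl PySem.Set.add [v] l = [v] := by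
  intro l
  induction l with
  | nil => intro _; rfl
  | cons u t ih =>
      intro hall
      rw [List.foldl_cons]
      have : PySem.Set.add [v] u = [v] := by
        simp [PySem.Set.add, hall u (by simp)]
      rw [this, ih (fun w hw => hall w (by simp [hw]))]

theorem pvDedup_sublist : ∀ l : List Int, List.Sublist (PySem.List.dedup l) l := by
  have key : ∀ l : List Int, List.Sublist (List.foldl PySem.Set.add PySem.Set.empty l) l := by
    intro l
    induction l using List.reverseRecOn with
    | nil => exact List.Sublist.refl _
    | append_singleton t x ih =>
        rw [List.foldl_append, List.foldl_cons, List.foldl_nil]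
        by_cases hc : PySem.Set.contains (List.foldl PySem.Set.add PySem.Set.empty t) x = true
        · simp only [PySem.Set.add, hc, if_pos]
          exact ih.trans (List.sublist_append_left t [x])
        · simp only [PySem.Set.add, hc, Bool.false_eq_true, if_false]
          exact List.Sublist.append ih (List.Sublist.refl [x])
  intro l
  have : PySem.List.dedup l = List.foldl PySem.Set.add PySem.Set.empty l := by
    rw [PySem.List.dedup_eq_ofList]; rfl
  rw [this]
  exact key l

theorem pvDedup_run (v : Int) (l₁ l₂ : List Int) (hne : l₁ ≠ []) (hall : ∀ u ∈ l₁, u = v)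
    (hv : v ∉ l₂) : PySem.List.dedup (l₁ ++ l₂) = v :: PySem.List.dedup l₂ := by
  cases l₁ with
  | nil => exact absurd rfl hne
  | cons u t =>
      have hu : u = v := hall u (by simp)
      subst hu
      show List.foldl PySem.Set.add PySem.Set.empty (u :: t ++ l₂) = _
      rw [List.cons_append, List.foldl_cons]
      have h1 : PySem.Set.add PySem.Set.empty u = [u] := rfl
      rw [h1, List.foldl_append, pvAdd_const u t (fun w hw => hall w (by simp [hw])),
        pvAdd_cons u l₂ [] hv]
      rfl

-- the unique-ordered-ranks list IS the dedup of the descending-sorted block's ordered ranks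
theorem pvUniq_eq (xs : List pvHand) (r : Int) :
    pvUniq xs r = PySem.List.dedup ((pvIsort pvRev (pvGrp xs r)).map (fun h => h.2.2)) := by
  have hpwb : (pvIsort pvRev (pvGrp xs r)).Pairwise (fun a b => b.2.2 ≤ a.2.2) :=
    PySem.List.sorted_pairwise_rev (pvGrp xs r) (fun h => h.2.2)
  have hpwm : ((pvIsort pvRev (pvGrp xs r)).map (fun h => h.2.2)).Pairwise
      (fun a b : Int => b ≤ a) := hpwb.map _ (fun a b h => h)
  have hsub : List.Sublist (PySem.List.dedup ((pvIsort pvRev (pvGrp xs r)).map (fun h => h.2.2)))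
      ((pvIsort pvRev (pvGrp xs r)).map (fun h => h.2.2)) := pvDedup_sublist _
  have hpwd : (PySem.List.dedup ((pvIsort pvRev (pvGrp xs r)).map (fun h => h.2.2))).Pairwise
      (fun a b : Int => b ≤ a) := hpwm.sublist hsub
  have hndd : (PySem.List.dedup ((pvIsort pvRev (pvGrp xs r)).map (fun h => h.2.2))).Nodup :=
    PySem.List.nodup_dedup _
  apply List.Perm.eq_of_pairwise (le := fun a b : Int => b < a)
    (fun a b _ _ h1 h2 => by omega)
  · exact (pvKbT_pw _ (PySem.Set.nodup_ofList _)).imp (by intro a b hab; simpa [pvKbT] using hab)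
  · exact ((hpwd.and hndd).imp (by intro a b hab; have := hab.1; have := hab.2; omega))
  · have hnd1 : (pvUniq xs r).Nodup := (pvIsort_perm _ _).nodup_iff.2 (PySem.Set.nodup_ofList _)
    rw [List.perm_ext_iff_of_nodup hnd1 hndd]
    intro v
    rw [pvUniq, pvMem_isort, PySem.Set.mem_ofList, PySem.List.mem_dedup]
    constructor
    · intro hv
      obtain ⟨h, hh, he⟩ := List.mem_map.1 hv
      exact List.mem_map.2 ⟨h, (pvMem_isort _ _ _).2 ((pvMem_isort _ _ _).1 hh), he⟩
    · intro hv
      obtain ⟨h, hh, he⟩ := List.mem_map.1 hv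
      exact List.mem_map.2 ⟨h, (pvMem_isort _ _ _).2 ((pvMem_isort _ _ _).1 hh), he⟩


-- ---- the counting scan on a descending block produces the dense 1-based index ----
theorem pvDensify_const_append (M r v : Int) : ∀ (run : List pvHand), (∀ h ∈ run, h.2.2 = v) →
    ∀ (l₂ : List pvHand) (c : Int),
      pvDensify M r (run ++ l₂) (some v) c =
        run.map (fun h => (h.1, M + 1 - r, c)) ++ pvDensify M r l₂ (some v) c := by
  intro run
  induction run with
  | nil => intro _ l₂ c; rfl
  | cons h t ih =>
      intro hall l₂ c
      have hv : h.2.2 = v := hall h (by simp)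
      rw [List.cons_append, pvDensify, if_pos (by rw [hv]), hv,
        ih (fun y hy => hall y (by simp [hy])) l₂ c]
      simp

theorem pvDensify_shift (M r : Int) : ∀ (t : List pvHand) (p : Option Int) (c δ : Int),
    pvDensify M r t p (c + δ) = (pvDensify M r t p c).map (fun x => (x.1, x.2.1, x.2.2 + δ)) := by
  intro t
  induction t with
  | nil => intro p c δ; rfl
  | cons h u ih =>
      intro p c δ
      rw [pvDensify, pvDensify]
      by_cases hp : p = some h.2.2
      · rw [if_pos hp, if_pos hp, ih]
        simp
      · rw [if_neg hp, if_neg hp, show c + δ + 1 = (c + 1) + δ by ring, ih]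
        simp

theorem pvDensify_some_ne (M r v : Int) : ∀ (t : List pvHand),
    (t = [] ∨ ∀ h, t.head? = some h → h.2.2 ≠ v) →
    ∀ c, pvDensify M r t (some v) c = pvDensify M r t none c := by
  intro t ht c
  cases t with
  | nil => rfl
  | cons h u =>
      rcases ht with ht | ht
      · cases ht
      · have := ht h rfl
        rw [pvDensify, pvDensify]
        rw [if_neg (by simpa using fun he => this he.symm), if_neg (by simp)]

theorem pvDense_main (M r : Int) : ∀ (n : Nat) (b : List pvHand), b.length ≤ n →
    b.Pairwise (fun x y => y.2.2 ≤ x.2.2) →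
    pvDensify M r b none 0 = b.map (fun h =>
      (h.1, M + 1 - r, ((PySem.List.dedup (b.map (fun h => h.2.2))).idxOf h.2.2 : Int) + 1)) := by
  intro n
  induction n with
  | zero =>
      intro b hb _
      have : b = [] := List.eq_nil_of_length_eq_zero (Nat.le_zero.1 hb)
      subst this; rfl
  | succ n ih =>
      intro b hb hpw
      cases hbe : b with
      | nil => rfl
      | cons h0 t0 =>
          subst hbe
          -- split off the leading run of the top ordered rank
          have htk := List.takeWhile_append_dropWhile (p := fun h : pvHand => h.2.2 == h0.2.2)
            (l := h0 :: t0)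
          set run := (h0 :: t0).takeWhile (fun h : pvHand => h.2.2 == h0.2.2) with hrun
          set b' := (h0 :: t0).dropWhile (fun h : pvHand => h.2.2 == h0.2.2) with hb'
          have hrun0 : run = h0 :: t0.takeWhile (fun h : pvHand => h.2.2 == h0.2.2) := by
            rw [hrun, List.takeWhile_cons, if_pos (by simp)]
          have hb'0 : b' = t0.dropWhile (fun h : pvHand => h.2.2 == h0.2.2) := by
            rw [hb', List.dropWhile_cons, if_pos (by simp)]
          have hrall : ∀ h ∈ run, h.2.2 = h0.2.2 := by
            intro h hh
            have := List.mem_takeWhile_imp hh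
            simpa using this
          have hb'pw : b'.Pairwise (fun x y => y.2.2 ≤ x.2.2) := hpw.sublist (List.dropWhile_sublist _)
          have hb'lt : ∀ u ∈ b', u.2.2 < h0.2.2 := by
            intro u hu
            cases hd : b' with
            | nil => rw [hd] at hu; cases hu
            | cons z rest =>
                have hz : (z.2.2 == h0.2.2) = false := by
                  have := List.head?_dropWhile_not (p := fun h : pvHand => h.2.2 == h0.2.2)
                    (l := h0 :: t0)
                  rw [← hb', hd] at this
                  simpa using this
                have hzle : z.2.2 ≤ h0.2.2 := by
                  have hzm : z ∈ h0 :: t0 := by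
                    have : z ∈ b' := by rw [hd]; simp
                    exact (List.dropWhile_sublist _).subset this
                  rcases List.mem_cons.1 hzm with rfl | hzm'
                  · omega
                  · exact (List.pairwise_cons.1 hpw).1 z hzm'
                have hzlt : z.2.2 < h0.2.2 := by
                  have : z.2.2 ≠ h0.2.2 := by simpa using hz
                  omega
                rw [hd] at hu
                rcases List.mem_cons.1 hu with rfl | hu'
                · exact hzlt
                · have : u.2.2 ≤ z.2.2 := (List.pairwise_cons.1 (hd ▸ hb'pw)).1 u hu'
                  omega
          have hlen : b'.length ≤ n := by
            have h1 : run.length + b'.length = (h0 :: t0).length := by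
              rw [← List.length_append, htk]
            have h2 : 1 ≤ run.length := by rw [hrun0]; simp
            have := hb
            simp only [List.length_cons] at this
            omega
          have hIH := ih b' hlen hb'pw
          -- dedup splits as top value :: rest
          have hded : PySem.List.dedup ((h0 :: t0).map (fun h => h.2.2)) =
              h0.2.2 :: PySem.List.dedup (b'.map (fun h => h.2.2)) := by
            have : (h0 :: t0).map (fun h => h.2.2) =
                run.map (fun h => h.2.2) ++ b'.map (fun h => h.2.2) := by
              rw [← List.map_append, htk]
            rw [this]
            apply pvDedup_run
            · rw [hrun0]; simp
            · intro u hu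
              obtain ⟨h, hh, he⟩ := List.mem_map.1 hu
              rw [← he]; exact hrall h hh
            · intro hcon
              obtain ⟨h, hh, he⟩ := List.mem_map.1 hcon
              have := hb'lt h hh
              omega
          -- evaluate the scan over the run, then over the remainder
          have hb'ne_head : b' = [] ∨ ∀ h, b'.head? = some h → h.2.2 ≠ h0.2.2 := by
            cases hd : b' with
            | nil => exact Or.inl rfl
            | cons z rest =>
                refine Or.inr (fun h hh => ?_)
                have hz : h = z := by simpa using hh.symm
                subst hz
                have := hb'lt h (by rw [hd]; simp)
                omega
          have hLrun : pvDensify M r (run ++ b') none 0 =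
              run.map (fun h => (h.1, M + 1 - r, (1 : Int))) ++ pvDensify M r b' (some h0.2.2) 1 := by
            rw [hrun0, List.cons_append, pvDensify, if_neg (by simp)]
            rw [pvDensify_const_append M r h0.2.2 _
              (fun y hy => hrall y (by rw [hrun0]; simp [hy])) b' (0 + 1)]
            simp
          have hLb' : pvDensify M r b' (some h0.2.2) 1 =
              (pvDensify M r b' none 0).map (fun x => (x.1, x.2.1, x.2.2 + 1)) := by
            rw [pvDensify_some_ne M r h0.2.2 b' hb'ne_head, show (1 : Int) = 0 + 1 by ring,
              pvDensify_shift]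
            norm_num
          have hsplit : (h0 :: t0) = run ++ b' := htk.symm
          conv_lhs => rw [hsplit]
          rw [hLrun, hLb', hIH, hded, List.map_map]
          conv_rhs => rw [hsplit, List.map_append]
          congr 1
          · apply List.map_congr_left
            intro h hh
            have := hrall h hh
            rw [this, List.idxOf_cons_self]
            simp
          · apply List.map_congr_left
            intro u hu
            have hne : u.2.2 ≠ h0.2.2 := by have := hb'lt u hu; omega
            simp only [Function.comp_def]
            rw [List.idxOf_cons_ne _ (fun he => hne he.symm)]
            push_cast
            ring_nf

-- ---- the ordered-rank map gives 1 + index in the unique list ----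
theorem pvUniq_nodup (xs : List pvHand) (r : Int) : (pvUniq xs r).Nodup :=
  (pvIsort_perm _ _).nodup_iff.2 (PySem.Set.nodup_ofList _)

theorem pvUniq_pw (xs : List pvHand) (r : Int) : (pvUniq xs r).Pairwise (fun a b => b < a) :=
  (pvKbT_pw _ (PySem.Set.nodup_ofList _)).imp (by intro a b hab; simpa [pvKbT] using hab)

theorem pvOrm_get (xs : List pvHand) (r v : Int) (hv : v ∈ pvUniq xs r) :
    ((pvOrm xs r).get? v).getD 0 = ((pvUniq xs r).idxOf v : Int) + 1 := by
  rw [pvOrm, pvEnumFold_get v _ (pvUniq_nodup xs r) 1 _, if_pos hv]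
  simp
  ring

-- ---- the per-rank block of A's final sort is B's counting scan on the descending block ----
theorem pvBlockA (xs : List pvHand) (M r : Int) :
    pvIsort pvLtA (pvPayload xs M r) = pvDensify M r (pvIsort pvRev (pvGrp xs r)) none 0 := by
  have hmemOd : ∀ h ∈ pvIsort pvFwd (pvGrp xs r), h.2.2 ∈ pvUniq xs r := by
    intro h hh
    rw [pvUniq, pvMem_isort, PySem.Set.mem_ofList]
    exact List.mem_map.2 ⟨h, hh, rfl⟩
  -- 1: within the block the final-sort comparison is the ordered-rank comparison
  have h1 : pvIsort pvLtA (pvPayload xs M r) = pvIsort pvFwd (pvPayload xs M r) := by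
    apply pvIsort_congr
    intro a ha b hb
    obtain ⟨a', _, ha'⟩ := List.mem_map.1 ha
    obtain ⟨b', _, hb'⟩ := List.mem_map.1 hb
    have ha1 : a.2.1 = M + 1 - r := by rw [← ha']
    have hb1 : b.2.1 = M + 1 - r := by rw [← hb']
    simp [pvLtA, pvFwd, ha1, hb1]
  -- 2: the sort commutes with the payload map
  have h2 : pvIsort pvFwd (pvPayload xs M r) =
      (pvIsort (fun a b => pvFwd
          ((fun h : pvHand => (h.1, M + 1 - r, ((pvOrm xs r).get? h.2.2).getD 0)) a)
          ((fun h : pvHand => (h.1, M + 1 - r, ((pvOrm xs r).get? h.2.2).getD 0)) b))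
        (pvIsort pvFwd (pvGrp xs r))).map
        (fun h : pvHand => (h.1, M + 1 - r, ((pvOrm xs r).get? h.2.2).getD 0)) := by
    rw [pvPayload, pvIsort_map]
  -- 3: comparing dense indices is comparing ordered ranks, reversed
  have h3 : pvIsort (fun a b => pvFwd
        ((fun h : pvHand => (h.1, M + 1 - r, ((pvOrm xs r).get? h.2.2).getD 0)) a)
        ((fun h : pvHand => (h.1, M + 1 - r, ((pvOrm xs r).get? h.2.2).getD 0)) b))
      (pvIsort pvFwd (pvGrp xs r)) = pvIsort pvRev (pvIsort pvFwd (pvGrp xs r)) := by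
    apply pvIsort_congr
    intro a ha b hb
    have hau := hmemOd a ((pvMem_isort _ _ _).2 ((pvMem_isort _ _ _).1 ha))
    have hbu := hmemOd b ((pvMem_isort _ _ _).2 ((pvMem_isort _ _ _).1 hb))
    have hidx := pvIdx_anti (pvUniq xs r) (pvUniq_pw xs r) a.2.2 b.2.2 hau hbu
    have hiff : (((pvOrm xs r).get? a.2.2).getD 0 < ((pvOrm xs r).get? b.2.2).getD 0) ↔
        (b.2.2 < a.2.2) := by
      rw [pvOrm_get xs r _ hau, pvOrm_get xs r _ hbu, ← hidx]
      omega
    simp only [pvFwd, pvRev]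
    rw [decide_eq_decide]
    exact hiff
  rw [h1, h2, h3, pvRevFwd]
  -- 4: the payload of the descending block is the counting scan
  have hpwb : (pvIsort pvRev (pvGrp xs r)).Pairwise (fun x y => y.2.2 ≤ x.2.2) :=
    PySem.List.sorted_pairwise_rev (pvGrp xs r) (fun h => h.2.2)
  rw [pvDense_main M r (pvIsort pvRev (pvGrp xs r)).length _ le_rfl hpwb]
  apply List.map_congr_left
  intro h hh
  have hhu : h.2.2 ∈ pvUniq xs r := by
    rw [pvUniq, pvMem_isort, PySem.Set.mem_ofList]
    refine List.mem_map.2 ⟨h, ?_, rfl⟩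
    exact (pvMem_isort _ _ _).2 ((pvMem_isort _ _ _).1 hh)
  rw [pvOrm_get xs r _ hhu, pvUniq_eq]

-- ---- keys and blocks of A's final sort ----
theorem pvMem_grp_ne_nil (xs : List pvHand) (r : Int)
    (hr : r ∈ PySem.Set.ofList (xs.map (fun h => h.2.1))) : pvGrp xs r ≠ [] := by
  have : r ∈ xs.map (fun h => h.2.1) := (PySem.Set.mem_ofList ..).1 hr
  obtain ⟨h, hh, he⟩ := List.mem_map.1 this
  exact List.ne_nil_of_mem (List.mem_filter.2 ⟨hh, by simp [he]⟩)

theorem pvPayload_fst (xs : List pvHand) (M r : Int) (h : pvHand) (hh : h ∈ pvPayload xs M r) :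
    h.2.1 = M + 1 - r := by
  obtain ⟨h', _, he⟩ := List.mem_map.1 hh
  rw [← he]

theorem pvKeysA (xs : List pvHand) (M : Int) :
    pvIsort pvKbF (PySem.Set.ofList
      (((pvIsort pvKbF (PySem.Set.ofList (xs.map (fun h => h.2.1)))).flatMap
        (fun r => pvPayload xs M r)).map (fun h => h.2.1))) =
    (pvIsort pvKbT (PySem.Set.ofList (xs.map (fun h => h.2.1)))).map (fun r => M + 1 - r) := by
  apply List.Perm.eq_of_pairwise (le := fun a b : Int => a < b) (fun a b _ _ h1 h2 => by omega)
  · exact (pvKbF_pw _ (PySem.Set.nodup_ofList _)).imp (by intro a b hab; simpa [pvKbF] using hab)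
  · have hp2 : (pvIsort pvKbT (PySem.Set.ofList (xs.map (fun h => h.2.1)))).Pairwise
        (fun a b => M + 1 - a < M + 1 - b) :=
      (pvKbT_pw _ (PySem.Set.nodup_ofList _)).imp
        (by intro a b hab; simp only [pvKbT, decide_eq_true_eq] at hab; omega)
    exact hp2.map (fun r => M + 1 - r) (fun a b h => h)
  · have hnd1 := (pvIsort_perm pvKbF _).nodup_iff.2 (PySem.Set.nodup_ofList
      ((((pvIsort pvKbF (PySem.Set.ofList (xs.map (fun h => h.2.1)))).flatMap
        (fun r => pvPayload xs M r)).map (fun h => h.2.1))))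
    have hnd2 : ((pvIsort pvKbT (PySem.Set.ofList (xs.map (fun h => h.2.1)))).map
        (fun r => M + 1 - r)).Nodup := by
      apply List.Nodup.map (f := fun r => M + 1 - r) (fun a b h => by dsimp only at h; omega)
      exact (pvIsort_perm pvKbT _).nodup_iff.2 (PySem.Set.nodup_ofList _)
    rw [List.perm_ext_iff_of_nodup hnd1 hnd2]
    intro v
    rw [pvMem_isort, PySem.Set.mem_ofList]
    constructor
    · intro hv
      obtain ⟨h, hh, he⟩ := List.mem_map.1 hv
      obtain ⟨r, hr, hhr⟩ := List.mem_flatMap.1 hh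
      refine List.mem_map.2 ⟨r, ?_, by rw [← he, pvPayload_fst xs M r h hhr]⟩
      rw [pvMem_isort] at hr ⊢
      exact hr
    · intro hv
      obtain ⟨r, hr, he⟩ := List.mem_map.1 hv
      rw [pvMem_isort] at hr
      have hgrp := pvMem_grp_ne_nil xs r hr
      have hpne : pvPayload xs M r ≠ [] := by
        rw [pvPayload]
        simp only [ne_eq, List.map_eq_nil_iff]
        intro hcon
        refine hgrp ?_
        have hpm := pvIsort_perm pvFwd (pvGrp xs r)
        rw [hcon] at hpm
        exact List.eq_nil_of_length_eq_zero (by simpa using hpm.length_eq.symm)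
      obtain ⟨h, hh⟩ := List.exists_mem_of_ne_nil _ hpne
      refine List.mem_map.2 ⟨h, List.mem_flatMap.2 ⟨r, (pvMem_isort _ _ _).2 hr, hh⟩, ?_⟩
      rw [pvPayload_fst xs M r h hh, he]

theorem pvFlatPick (r : Int) : ∀ (l : List Int) (G : Int → List pvHand), l.Nodup → r ∈ l →
    (∀ u ∈ l, u ≠ r → G u = []) → l.flatMap G = G r := by
  intro l
  induction l with
  | nil => intro G _ hr _; cases hr
  | cons a l' ih =>
      intro G hnd hr hG
      rw [List.flatMap_cons]
      by_cases ha : a = r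
      · subst ha
        have : l'.flatMap G = [] := by
          rw [List.flatMap_eq_nil_iff]
          intro u hu
          exact hG u (by simp [hu]) (fun he => (List.nodup_cons.1 hnd).1 (he ▸ hu))
        rw [this, List.append_nil]
      · rw [hG a (by simp) ha, List.nil_append,
          ih G (List.nodup_cons.1 hnd).2 (by rcases List.mem_cons.1 hr with h | h
                                             · exact absurd h.symm ha
                                             · exact h)
            (fun u hu => hG u (by simp [hu]))]

theorem pvFilterAdj (xs : List pvHand) (M r : Int)
    (hr : r ∈ PySem.Set.ofList (xs.map (fun h => h.2.1))) :
    ((pvIsort pvKbF (PySem.Set.ofList (xs.map (fun h => h.2.1)))).flatMap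
      (fun r' => pvPayload xs M r')).filter (fun h => h.2.1 == M + 1 - r) = pvPayload xs M r := by
  rw [List.filter_flatMap]
  have hstep : ∀ r' ∈ pvIsort pvKbF (PySem.Set.ofList (xs.map (fun h => h.2.1))), r' ≠ r →
      (pvPayload xs M r').filter (fun h => h.2.1 == M + 1 - r) = [] := by
    intro r' _ hne
    rw [List.filter_eq_nil_iff]
    intro h hh hcon
    have hf := pvPayload_fst xs M r' h hh
    have hb2 := beq_iff_eq.1 hcon
    exact hne (by omega)
  rw [pvFlatPick r _ _ ((pvIsort_perm pvKbF _).nodup_iff.2 (PySem.Set.nodup_ofList _))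
    ((pvMem_isort _ _ _).2 hr)
    (fun u hu hne => hstep u hu hne)]
  apply List.filter_eq_self.2
  intro h hh
  simp [pvPayload_fst xs M r h hh]


-- ---- assembling port A ----
theorem pvSorted2A (l : List pvHand) :
    PySem.List.sorted2 l (fun x => x.2.1) (fun x => x.2.2) false = pvIsort pvLtA l := rfl
theorem pvSortedF (S : List Int) :
    PySem.List.sorted S (fun k => k) false = pvIsort pvKbF S := rfl
theorem pvSortedOdF (l : List pvHand) :
    PySem.List.sorted l (fun x => x.2.2) false = pvIsort pvFwd l := rfl

theorem pvBodyA (xs : List pvHand) (M rank : Int) (acc : List pvHand) :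
    List.foldl (fun acc2 hand => acc2 ++ [(hand.1, M + 1 - rank,
        ((List.foldl (fun m p => m.insert p.2 p.1) PySem.Dict.empty
          (PySem.List.enumerate (PySem.List.sorted (PySem.Set.ofList
            (List.map (fun h => h.2.2) (pvIsort pvFwd (List.filter (fun h => h.2.1 == rank) xs))))
            (fun v => v) true) 1)).get? hand.2.2).getD 0)]) acc
      (pvIsort pvFwd (List.filter (fun h => h.2.1 == rank) xs))
    = acc ++ pvPayload xs M rank := by
  rw [PySem.List.foldl_append_singleton_eq_map]
  rfl

theorem pvAdjEq (xs : List pvHand) (M : Int) : ∀ (L : List Int) (acc : List pvHand),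
    List.foldl (fun acc rank =>
      List.foldl (fun acc2 hand => acc2 ++ [(hand.1, M + 1 - rank,
        ((List.foldl (fun m p => m.insert p.2 p.1) PySem.Dict.empty
          (PySem.List.enumerate (PySem.List.sorted (PySem.Set.ofList
            (List.map (fun h => h.2.2) (pvIsort pvFwd (List.filter (fun h => h.2.1 == rank) xs))))
            (fun v => v) true) 1)).get? hand.2.2).getD 0)]) acc
        (pvIsort pvFwd (List.filter (fun h => h.2.1 == rank) xs))) acc L
    = acc ++ L.flatMap (fun r => pvPayload xs M r) := by
  intro L
  induction L with
  | nil => intro acc; simp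
  | cons r L' ih =>
      intro acc
      rw [List.foldl_cons, pvBodyA xs M r acc, ih, List.flatMap_cons, List.append_assoc]

theorem pvPortA_eq (xs : List (String × Int × Int)) (M : Int)
    (hmax : PySem.List.max? (xs.map (fun h => h.2.1)) (fun v => v) = some M) :
    reverse_all_ranks_and_ordered_ranks xs = pvCanon xs M := by
  have hmax' : PySem.List.max?
      (xs.foldl (fun d hand => d.modify hand.2.1 [] (· ++ [hand])) PySem.Dict.empty).keys
      (fun k => k) = some M := by
    rw [pvGroups_keys,
      pvMax_eq _ (xs.map (fun h => h.2.1)) (fun v => PySem.Set.mem_ofList ..)]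
    exact hmax
  simp only [reverse_all_ranks_and_ordered_ranks]
  rw [hmax']
  simp only [pvGroups_getD, pvGroups_keys, pvSortedF, pvSortedOdF, pvSorted2A]
  rw [pvAdjEq xs M _ [], List.nil_append]
  rw [pvGroupsort (fun h : pvHand => h.2.1) pvKbF pvLtA pvKbF_total pvKbF_asymm pvKbF_trans pvKbF_pw
    (by intro x y h; simp only [pvKbF, decide_eq_true_eq] at h; simp [pvLtA]; omega)
    (by intro x y h; simp only [pvKbF, decide_eq_true_eq] at h; simp [pvLtA]; omega)]
  rw [pvKeysA xs M, List.flatMap_map]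
  rw [pvCanon]
  apply List.flatMap_congr
  intro r hr
  have hrS : r ∈ PySem.Set.ofList (xs.map (fun h => h.2.1)) := (pvMem_isort _ _ _).1 hr
  show pvIsort pvLtA _ = _
  rw [pvFilterAdj xs M r hrS]
  exact pvBlockA xs M r

-- ===== VERDICT (by name: the statement is the Claim_ definition above) =====
theorem reverse_all_ranks_and_ordered_ranks_spec : Claim_equal_reverse_all_ranks_and_ordered_ranks := by
  intro xs _ hpre
  unfold Spec_reverse_all_ranks_and_ordered_ranks
  cases hmax : PySem.List.max? (xs.map (fun h => h.2.1)) (fun v => v) with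
  | none =>
      have := (PySem.List.max?_eq_none_iff ..).1 hmax
      exact absurd (by simpa using this) hpre
  | some M => rw [pvPortA_eq xs M hmax, pvPortB_eq xs M hmax]
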